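-- pv_equiv track=rewrite | github.com/aharonidan/eq_index | app/index.py | create_components_hash
-- ===== SOURCE A (Python) =====
-- def create_components_hash(raw_clique_output):
--     raw_clique_output = [item.split() for item in raw_clique_output if item != '\n']
--     counter = 0
--     result = {}
--     for j in range (len(raw_clique_output)):
--         if raw_clique_output[j][0] == "Connected":
--             result[counter] = []
--             j += 1
--             while(j < len(raw_clique_output) and raw_clique_output[j][0] != "Connected"):
--                 if raw_clique_output[j]:
--                     result[counter].append(raw_clique_output[j])
--                 j += 1
--             result[counter] = parse_component(result[counter])
--             counter += 1
--     return result
--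
-- def parse_component(rows):
--     result = []
--     for row in rows:
--         row = (" ".join(row)).split('x')
--         player1_strategies = row[0].replace('{','').replace('}','').split(',')
--         player2_strategies = row[1].replace('{','').replace('}','').split(',')
--         for strg_player1 in player1_strategies:
--             for strg_player2 in player2_strategies:
--                 pair = [int(strg_player1),int(strg_player2)]
--                 if pair not in result:
--                     result.append(pair)
--     return result
-- ===== SOURCE B (Python) =====
-- def create_components_hash(raw_clique_output):
--     result = {}
--     counter = 0
--     pending = None  # pair stream of the currently open component; None before the first marker
--     for item in raw_clique_output:
--         if item == '\n':
--             continue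
--         row = item.split()
--         if row[0] == "Connected":
--             if pending is not None:
--                 result[counter] = [list(p) for p in dict.fromkeys(pending)]
--                 counter += 1
--             pending = []
--         elif pending is not None:
--             parts = " ".join(row).split('x')
--             left = parts[0].replace('{', '').replace('}', '').split(',')
--             right = parts[1].replace('{', '').replace('}', '').split(',')
--             pending.extend((int(a), int(b)) for a in left for b in right)
--     if pending is not None:
--         result[counter] = [list(p) for p in dict.fromkeys(pending)]
--     return result
-- ===== Notes on version B (the rewrite author's own statement) =====
-- stated objective: alternative
-- what changed: Replaces A's collect-then-parse design (outer index loop, inner while lookahead that re-scans each segment, then parse_component with an O(m^2) 'pair not in result' dedup interleaved with pair generation) by a single streaming state-machine pass over the raw lines: each line is processed exactly once, pairs of the open component are accumulated with duplicates in a pending stream, and deduplication is deferred to component finalization via dict.fromkeys ordered dedup; no segment lists are ever materialized. …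
import Mathlib
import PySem

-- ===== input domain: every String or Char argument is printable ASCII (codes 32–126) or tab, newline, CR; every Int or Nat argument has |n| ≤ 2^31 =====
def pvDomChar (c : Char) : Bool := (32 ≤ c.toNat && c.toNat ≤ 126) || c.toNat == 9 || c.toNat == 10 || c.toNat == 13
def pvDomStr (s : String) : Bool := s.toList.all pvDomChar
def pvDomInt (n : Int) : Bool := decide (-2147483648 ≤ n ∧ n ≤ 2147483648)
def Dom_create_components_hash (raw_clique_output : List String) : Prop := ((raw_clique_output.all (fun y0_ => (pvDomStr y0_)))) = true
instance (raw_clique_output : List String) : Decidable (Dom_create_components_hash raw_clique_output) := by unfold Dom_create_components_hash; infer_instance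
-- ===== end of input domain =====

-- B is a single streaming state-machine pass (pairs accumulated with duplicates, dedup deferred
-- to component finalization via dict.fromkeys) instead of A's collect-then-parse nested loops;
-- return values proved equal on Pre_.

-- ===== PORT A =====
-- raw_clique_output[j][0] == "Connected" (pyGetD default only reached outside Pre_)
def pvIsMarkerA (row : List String) : Bool := PySem.List.pyGetD row (0 : Int) "" == "Connected"

-- parse_component: nested for-loops with "pair not in result" list dedup
def pvParseComponentA (rows : List (List String)) : List (List Int) :=
  rows.foldl (fun result row =>
    let parts := (PySem.Str.split? (PySem.Str.join " " row) "x").getD []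
    let p1 := (PySem.Str.split? (PySem.Str.replace (PySem.Str.replace (PySem.List.pyGetD parts 0 "") "{" "") "}" "") ",").getD []
    let p2 := (PySem.Str.split? (PySem.Str.replace (PySem.Str.replace (PySem.List.pyGetD parts 1 "") "{" "") "}" "") ",").getD []
    p1.foldl (fun result s1 =>
      p2.foldl (fun result s2 =>
        let pair : List Int := [(PySem.Int.ofStr? s1).getD 0, (PySem.Int.ofStr? s2).getD 0]
        if pair ∈ result then result else result ++ [pair]) result) result) []

-- the inner while loop: collect rows from index j until the next "Connected" row
def pvWhileA (rows : List (List String)) (j : Nat) (acc : List (List String)) : List (List String) :=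
  if h : j < rows.length then
    if pvIsMarkerA rows[j] then acc
    else pvWhileA rows (j + 1) (if rows[j].isEmpty then acc else acc ++ [rows[j]])
  else acc
termination_by rows.length - j

-- the outer "for j in range(len(rows))" loop with counter and result dict (assoc list)
def pvForA (rows : List (List String)) (j : Nat) (counter : Int)
    (result : List (Int × List (List Int))) : List (Int × List (List Int)) :=
  if h : j < rows.length then
    if pvIsMarkerA rows[j] then
      pvForA rows (j + 1) (counter + 1)
        (result ++ [(counter, pvParseComponentA (pvWhileA rows (j + 1) []))])
    else pvForA rows (j + 1) counter result
  else result
termination_by rows.length - j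

def create_components_hash (raw_clique_output : List String) : List (Int × List (List Int)) :=
  pvForA ((raw_clique_output.filter (fun s => s ≠ "\n")).map PySem.Str.split₀) 0 0 []

-- ===== PORT B =====
-- the pair generator of one row: (int(a), int(b)) for a in left for b in right
def pvPairsOf (row : List String) : List (Int × Int) :=
  let parts := (PySem.Str.split? (PySem.Str.join " " row) "x").getD []
  let left := (PySem.Str.split? (PySem.Str.replace (PySem.Str.replace (PySem.List.pyGetD parts 0 "") "{" "") "}" "") ",").getD []
  let right := (PySem.Str.split? (PySem.Str.replace (PySem.Str.replace (PySem.List.pyGetD parts 1 "") "{" "") "}" "") ",").getD []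
  left.flatMap (fun a => right.map (fun b => ((PySem.Int.ofStr? a).getD 0, (PySem.Int.ofStr? b).getD 0)))

-- [list(p) for p in dict.fromkeys(pending)]
def pvDedupB (ps : List (Int × Int)) : List (List Int) :=
  (PySem.List.dedup ps).map (fun p => [p.1, p.2])

-- loop state: (result, counter, pending); pending = none before the first marker
def pvStepRowB (st : List (Int × List (List Int)) × Int × Option (List (Int × Int)))
    (row : List String) : List (Int × List (List Int)) × Int × Option (List (Int × Int)) :=
  if PySem.List.pyGetD row (0 : Int) "" == "Connected" then
    match st.2.2 with
    | none => (st.1, st.2.1, some [])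
    | some ps => (st.1 ++ [(st.2.1, pvDedupB ps)], st.2.1 + 1, some [])
  else
    match st.2.2 with
    | none => st
    | some ps => (st.1, st.2.1, some (ps ++ pvPairsOf row))

def pvStepB (st : List (Int × List (List Int)) × Int × Option (List (Int × Int)))
    (item : String) : List (Int × List (List Int)) × Int × Option (List (Int × Int)) :=
  if item == "\n" then st else pvStepRowB st (PySem.Str.split₀ item)

-- the trailing "if pending is not None: result[counter] = …"
def pvFinalizeB (st : List (Int × List (List Int)) × Int × Option (List (Int × Int))) :
    List (Int × List (List Int)) :=
  match st.2.2 with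
  | none => st.1
  | some ps => st.1 ++ [(st.2.1, pvDedupB ps)]

def create_components_hash_alt (raw_clique_output : List String) : List (Int × List (List Int)) :=
  pvFinalizeB (raw_clique_output.foldl pvStepB ([], 0, none))

-- ===== PRECONDITION & SPEC =====
-- one "x"-side of a row: all comma-separated tokens (braces removed) parse as int
def pvSideOK (s : String) : Bool :=
  ((PySem.Str.split? (PySem.Str.replace (PySem.Str.replace s "{" "") "}" "") ",").getD []).all
    (fun t => (PySem.Int.ofStr? t).isSome)

-- a parsed row: joined tokens split on 'x' give at least two parts, both sides int-parsable
def pvRowOK (row : List String) : Bool :=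
  match (PySem.Str.split? (PySem.Str.join " " row) "x").getD [] with
  | p0 :: p1 :: _ => pvSideOK p0 && pvSideOK p1
  | _ => false

-- Pre_ excludes exactly the inputs where Python A raises: a line whose split() is empty
-- (IndexError on row[0]), or a row in a component segment (after the first "Connected"
-- line, not itself a "Connected" line) with no 'x' (IndexError) or a token int() rejects
-- (ValueError).
def Pre_create_components_hash (raw_clique_output : List String) : Prop :=
  let rows := (raw_clique_output.filter (fun s => s ≠ "\n")).map PySem.Str.split₀
  (rows.all (fun r => !r.isEmpty)) = true ∧
  ((rows.drop (rows.findIdx (fun r => PySem.List.pyGetD r (0 : Int) "" == "Connected") + 1)).all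
    (fun r => (PySem.List.pyGetD r (0 : Int) "" == "Connected") || pvRowOK r)) = true

instance (raw_clique_output : List String) : Decidable (Pre_create_components_hash raw_clique_output) := by
  unfold Pre_create_components_hash; infer_instance

def pvWitness_create_components_hash : List String :=
  ["noise", "Connected component:", "{1,2}x{3}", "\n", "12x34", "Connected component:", "{1}x{2,3}"]

def Spec_create_components_hash (raw_clique_output : List String) (out : List (Int × List (List Int))) : Prop := out = create_components_hash_alt raw_clique_output
instance (raw_clique_output : List String) (out : List (Int × List (List Int))) : Decidable (Spec_create_components_hash raw_clique_output out) := by unfold Spec_create_components_hash; infer_instance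

-- ===== CLAIM (what is proved, stated in full; the proofs are below) =====
def Claim_equal_create_components_hash : Prop := ∀ (raw_clique_output : List String), Dom_create_components_hash raw_clique_output → Pre_create_components_hash raw_clique_output → Spec_create_components_hash raw_clique_output (create_components_hash raw_clique_output)

-- ===== LEMMAS AND PROOFS =====

-- proof-side reference objects
def pvSegs : List (List String) → List (List (List String))
  | [] => []
  | r :: rs => if pvIsMarkerA r then rs.takeWhile (fun x => !pvIsMarkerA x) :: pvSegs rs else pvSegs rs

def pvGoPairs (c : Int) : List (List String) → List (Int × List (List Int))
  | [] => []
  | r :: rs =>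
    if pvIsMarkerA r then
      (c, pvParseComponentA (rs.takeWhile (fun x => !pvIsMarkerA x))) :: pvGoPairs (c + 1) rs
    else pvGoPairs c rs

-- (1) while-loop characterization
theorem pvWhileA_eq (rows : List (List String)) (h1 : ∀ r ∈ rows, r.isEmpty = false) :
    ∀ j acc, pvWhileA rows j acc = acc ++ (rows.drop j).takeWhile (fun x => !pvIsMarkerA x) := by
  have key : ∀ n j acc, rows.length - j ≤ n →
      pvWhileA rows j acc = acc ++ (rows.drop j).takeWhile (fun x => !pvIsMarkerA x) := by
    intro n
    induction n with
    | zero =>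
      intro j acc hn
      have hge : rows.length ≤ j := by omega
      rw [pvWhileA]
      rw [dif_neg (by omega)]
      rw [List.drop_eq_nil_of_le hge]
      simp
    | succ n ih =>
      intro j acc hn
      rw [pvWhileA]
      by_cases h : j < rows.length
      · rw [dif_pos h]
        have hdrop : rows.drop j = rows[j] :: rows.drop (j + 1) := List.drop_eq_getElem_cons h
        rw [hdrop, List.takeWhile_cons]
        by_cases hm : pvIsMarkerA rows[j] = true
        · simp [hm]
        · have hne : rows[j].isEmpty = false := h1 _ (List.getElem_mem h)
          rw [if_neg hm, if_neg (by simp [hne])]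
          rw [ih (j + 1) (acc ++ [rows[j]]) (by omega)]
          rw [if_pos (show (!pvIsMarkerA rows[j]) = true by simp [hm])]
          simp
      · rw [dif_neg h]
        rw [List.drop_eq_nil_of_le (by omega)]
        simp
  intro j acc
  exact key (rows.length - j) j acc le_rfl

-- (2) for-loop characterization
theorem pvForA_eq (rows : List (List String)) (h1 : ∀ r ∈ rows, r.isEmpty = false) :
    ∀ j c res, pvForA rows j c res = res ++ pvGoPairs c (rows.drop j) := by
  have key : ∀ n j c res, rows.length - j ≤ n →
      pvForA rows j c res = res ++ pvGoPairs c (rows.drop j) := by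
    intro n
    induction n with
    | zero =>
      intro j c res hn
      rw [pvForA, dif_neg (by omega), List.drop_eq_nil_of_le (by omega)]
      simp [pvGoPairs]
    | succ n ih =>
      intro j c res hn
      rw [pvForA]
      by_cases h : j < rows.length
      · rw [dif_pos h]
        have hdrop : rows.drop j = rows[j] :: rows.drop (j + 1) := List.drop_eq_getElem_cons h
        rw [hdrop]
        by_cases hm : pvIsMarkerA rows[j] = true
        · rw [if_pos hm]
          rw [ih (j + 1) (c + 1) _ (by omega)]
          rw [pvWhileA_eq rows h1 (j + 1) []]
          simp only [pvGoPairs, if_pos hm, List.nil_append]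
          simp
        · rw [if_neg hm]
          rw [ih (j + 1) c res (by omega)]
          simp only [pvGoPairs, if_neg hm]
      · rw [dif_neg h, List.drop_eq_nil_of_le (by omega)]
        simp [pvGoPairs]
  intro j c res
  exact key (rows.length - j) j c res le_rfl

-- (3) pvGoPairs as a map over segments
theorem pvGoPairs_eq_map (l : List (List String)) :
    ∀ c, pvGoPairs c l =
      (PySem.List.enumerate (pvSegs l) c).map (fun p => (p.1, pvParseComponentA p.2)) := by
  induction l with
  | nil => intro c; simp [pvGoPairs, pvSegs]
  | cons r rs ih =>
    intro c
    by_cases h : pvIsMarkerA r = true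
    · simp only [pvGoPairs, pvSegs, if_pos h, PySem.List.enumerate_cons, List.map_cons]
      rw [ih (c + 1)]
    · simp only [pvGoPairs, pvSegs, if_neg h]
      exact ih c

-- (4) parse_component is the list-membership dedup of the row's pair STREAM
theorem pvParseA_eq_stream (rs : List (List String)) :
    pvParseComponentA rs =
      (rs.flatMap pvPairsOf).foldl
        (fun res p => if [p.1, p.2] ∈ res then res else res ++ [[p.1, p.2]]) [] := by
  unfold pvParseComponentA
  rw [List.foldl_flatMap]
  refine PySem.List.foldl_congr_mem rs _ _ [] (fun res row _ => ?_)
  simp only [pvPairsOf, List.foldl_flatMap, List.foldl_map]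

-- (5) list-membership dedup of a pair stream = dict.fromkeys dedup mapped to [a, b]
theorem pvDedupL_eq (ps : List (Int × Int)) :
    ∀ s : List (Int × Int),
      ps.foldl (fun res p => if [p.1, p.2] ∈ res then res else res ++ [[p.1, p.2]])
          (s.map (fun p => [p.1, p.2]))
        = (ps.foldl PySem.Set.add s).map (fun p => [p.1, p.2]) := by
  induction ps with
  | nil => intro s; simp
  | cons p ps ih =>
    intro s
    have hmem : ([p.1, p.2] ∈ s.map (fun p => [p.1, p.2])) ↔ p ∈ s := by
      simp only [List.mem_map]
      constructor
      · rintro ⟨q, hq, he⟩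
        have h1 : q.1 = p.1 := by injection he
        have h2 : q.2 = p.2 := by injection he with _ t; injection t
        have : q = p := Prod.ext h1 h2
        exact this ▸ hq
      · intro hp; exact ⟨p, hp, rfl⟩
    simp only [List.foldl_cons]
    by_cases hp : p ∈ s
    · rw [if_pos (hmem.mpr hp)]
      have hadd : PySem.Set.add s p = s := by
        rw [PySem.Set.add, if_pos ((PySem.Set.contains_iff s p).mpr hp)]
      rw [hadd]
      exact ih s
    · rw [if_neg (fun h => hp (hmem.mp h))]
      have hadd : PySem.Set.add s p = s ++ [p] := by
        rw [PySem.Set.add,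
          if_neg (fun h => hp ((PySem.Set.contains_iff s p).mp h))]
      rw [hadd, ← ih (s ++ [p])]
      simp

theorem pvParseA_eq_dedupB (rs : List (List String)) :
    pvParseComponentA rs = pvDedupB (rs.flatMap pvPairsOf) := by
  rw [pvParseA_eq_stream, pvDedupB, PySem.List.dedup_eq_ofList, PySem.Set.ofList]
  have := pvDedupL_eq (rs.flatMap pvPairsOf) []
  simpa [PySem.Set.empty] using this

-- (6) the raw-string fold is the row fold over the filtered, split rows
theorem pvFoldB_eq (raw : List String) :
    ∀ st, raw.foldl pvStepB st
      = ((raw.filter (fun s => s ≠ "\n")).map PySem.Str.split₀).foldl pvStepRowB st := by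
  induction raw with
  | nil => intro st; simp
  | cons item rest ih =>
    intro st
    by_cases h : item = "\n"
    · subst h
      simp only [List.foldl_cons, pvStepB, BEq.rfl, if_true]
      rw [ih st]
      simp
    · have hb : (item == "\n") = false := by simp [h]
      simp only [List.foldl_cons, pvStepB, hb, Bool.false_eq_true, if_false]
      rw [ih]
      rw [List.filter_cons_of_pos (by simp [h])]
      simp

-- (7) B's streaming pass, characterized with an OPEN component
theorem pvRunB_some (rows : List (List String)) :
    ∀ res c ps, pvFinalizeB (rows.foldl pvStepRowB (res, c, some ps))
      = (res ++ [(c, pvDedupB (ps ++ (rows.takeWhile (fun x => !pvIsMarkerA x)).flatMap pvPairsOf))])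
        ++ (PySem.List.enumerate (pvSegs rows) (c + 1)).map
            (fun p => (p.1, pvDedupB (p.2.flatMap pvPairsOf))) := by
  induction rows with
  | nil => intro res c ps; simp [pvFinalizeB, pvSegs]
  | cons r rs ih =>
    intro res c ps
    by_cases h : pvIsMarkerA r = true
    · have hstep : pvStepRowB (res, c, some ps) r
          = (res ++ [(c, pvDedupB ps)], c + 1, some []) := by
        simp [pvStepRowB, pvIsMarkerA] at h ⊢
        simp [h]
      simp only [List.foldl_cons, hstep]
      rw [ih]
      rw [List.takeWhile_cons_of_neg (by simp [h])]
      simp only [pvSegs, if_pos h, PySem.List.enumerate_cons, List.map_cons]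
      simp
    · have hstep : pvStepRowB (res, c, some ps) r
          = (res, c, some (ps ++ pvPairsOf r)) := by
        simp only [pvStepRowB, pvIsMarkerA] at h ⊢
        simp [h]
      simp only [List.foldl_cons, hstep]
      rw [ih]
      rw [List.takeWhile_cons_of_pos (by simp [h])]
      simp only [pvSegs, if_neg h, List.flatMap_cons, List.append_assoc]

-- (8) B's streaming pass from the initial (no open component) state
theorem pvRunB_none (rows : List (List String)) :
    ∀ res c, pvFinalizeB (rows.foldl pvStepRowB (res, c, none))
      = res ++ (PySem.List.enumerate (pvSegs rows) c).map
          (fun p => (p.1, pvDedupB (p.2.flatMap pvPairsOf))) := by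
  induction rows with
  | nil => intro res c; simp [pvFinalizeB, pvSegs]
  | cons r rs ih =>
    intro res c
    by_cases h : pvIsMarkerA r = true
    · have hstep : pvStepRowB (res, c, none) r = (res, c, some []) := by
        simp only [pvStepRowB, pvIsMarkerA] at h ⊢
        simp [h]
      simp only [List.foldl_cons, hstep]
      rw [pvRunB_some]
      simp only [pvSegs, if_pos h, PySem.List.enumerate_cons, List.map_cons]
      simp
    · have hstep : pvStepRowB (res, c, none) r = (res, c, none) := by
        simp only [pvStepRowB, pvIsMarkerA] at h ⊢
        simp [h]
      simp only [List.foldl_cons, hstep]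
      rw [ih]
      simp only [pvSegs, if_neg h]

-- ===== VERDICT (by name: the statement is the Claim_ definition above) =====
theorem create_components_hash_spec : Claim_equal_create_components_hash := by
  intro raw hdom hpre
  unfold Spec_create_components_hash
  obtain ⟨h1, _h2⟩ := hpre
  set rows := (raw.filter (fun s => s ≠ "\n")).map PySem.Str.split₀ with hrows
  have h1' : ∀ r ∈ rows, r.isEmpty = false := by
    intro r hr
    have := List.all_eq_true.mp h1 r hr
    simpa using this
  have hA : create_components_hash raw
      = (PySem.List.enumerate (pvSegs rows) 0).map (fun p => (p.1, pvParseComponentA p.2)) := by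
    simp only [create_components_hash]
    rw [← hrows]
    rw [pvForA_eq rows h1' 0 0 []]
    simp only [List.drop_zero, List.nil_append]
    exact pvGoPairs_eq_map rows 0
  have hB : create_components_hash_alt raw
      = (PySem.List.enumerate (pvSegs rows) 0).map
          (fun p => (p.1, pvDedupB (p.2.flatMap pvPairsOf))) := by
    simp only [create_components_hash_alt]
    rw [pvFoldB_eq raw ([], 0, none), ← hrows, pvRunB_none rows [] 0]
    simp
  rw [hA, hB]
  exact List.map_congr_left (fun p _ => by rw [pvParseA_eq_dedupB])
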